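-- pv_equiv track=rewrite | github.com/sweep7125/rulesets | .ci/optimize.py | build_xray_preserve_output_from_sets
-- ===== SOURCE A (Python) =====
-- from typing import Iterable, Iterator, List, Tuple, Set
--
-- def label_count(d: str) -> int:
--     return d.count(".") + 1 if d else 0
--
-- def dedup_other_rules(other_rules: Iterable[Tuple[str, str]]) -> Tuple[List[str], List[str]]:
--     kw: List[str] = []; rx: List[str] = []
--     seen_kw: Set[str] = set(); seen_rx: Set[str] = set()
--     for kind, val in other_rules:
--         if kind == "keyword":
--             if val not in seen_kw:
--                 seen_kw.add(val); kw.append(val)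
--         elif kind == "regexp":
--             if val not in seen_rx:
--                 seen_rx.add(val); rx.append(val)
--     return kw, rx
--
-- def build_xray_preserve_output_from_sets(e: Set[str], plus: Set[str], other_rules: Iterable[Tuple[str, str]]) -> List[str]:
--     kw_list, rx_list = dedup_other_rules(other_rules)
--     items: List[Tuple[str, str]] = []
--     items += [(b, "domain") for b in plus]
--     items += [(b, "full") for b in e]
--     items += [(v, "keyword") for v in kw_list]
--     items += [(v, "regexp") for v in rx_list]
--     rank = {"full": 0, "domain": 1, "keyword": 2, "regexp": 3}
--     def key(t: Tuple[str, str]) -> Tuple[int, int, str]: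
--         val, kind = t
--         return (rank.get(kind, 99), label_count(val), val)
--     items.sort(key=key)
--     out: List[str] = []
--     for val, kind in items:
--         if kind == "full":
--             out.append(f"full:{val}")
--         elif kind == "domain":
--             out.append(val)
--         elif kind == "keyword":
--             out.append(f"keyword:{val}")
--         elif kind == "regexp":
--             out.append(f"regexp:{val}")
--     return out
-- ===== SOURCE B (Python) =====
-- def label_count(d: str) -> int:
--     return d.count(".") + 1 if d else 0
--
--
-- def build_xray_preserve_output_from_sets(e, plus, other_rules):
--     # Group-wise build: dedup keyword/regexp values by first occurrence via
--     # dict.fromkeys, sort each of the four groups independently by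
--     # (label_count, value), and concatenate in the fixed rank order
--     # full -> domain -> keyword -> regexp with the prefix applied per group.
--     kw = list(dict.fromkeys(v for k, v in other_rules if k == "keyword"))
--     rx = list(dict.fromkeys(v for k, v in other_rules if k == "regexp"))
--     key = lambda v: (label_count(v), v)
--     return (
--         ["full:" + v for v in sorted(e, key=key)]
--         + sorted(plus, key=key)
--         + ["keyword:" + v for v in sorted(kw, key=key)]
--         + ["regexp:" + v for v in sorted(rx, key=key)]
--     )
-- ===== Notes on version B (the rewrite author's own statement) =====
-- stated objective: simpler
-- what changed: Replaces the tagged merged list, the rank dict, the composite (rank,label_count,val) sort and the kind-dispatch output loop by four independent per-group sorts by (label_count,val) concatenated in the fixed order full->domain->keyword->regexp, with dict.fromkeys doing the keyword/regexp dedup.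
import Mathlib
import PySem

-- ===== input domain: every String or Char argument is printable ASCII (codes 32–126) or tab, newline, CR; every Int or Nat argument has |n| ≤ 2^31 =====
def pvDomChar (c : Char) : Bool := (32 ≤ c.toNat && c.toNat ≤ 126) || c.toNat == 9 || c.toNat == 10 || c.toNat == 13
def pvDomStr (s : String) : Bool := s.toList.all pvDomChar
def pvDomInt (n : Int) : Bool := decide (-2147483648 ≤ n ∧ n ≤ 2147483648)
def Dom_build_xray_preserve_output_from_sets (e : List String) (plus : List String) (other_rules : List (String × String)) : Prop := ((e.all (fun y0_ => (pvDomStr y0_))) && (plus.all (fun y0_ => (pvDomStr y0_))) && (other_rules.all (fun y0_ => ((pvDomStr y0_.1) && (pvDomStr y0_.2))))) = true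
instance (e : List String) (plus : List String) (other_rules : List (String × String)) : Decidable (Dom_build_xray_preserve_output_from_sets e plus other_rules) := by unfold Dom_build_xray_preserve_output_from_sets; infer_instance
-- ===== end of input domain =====

-- B replaces A's tagged merged list, rank dict, composite-key sort and kind-dispatch output
-- loop by four independent per-group sorts concatenated in the fixed rank order (simpler).

-- ===== PORT A =====
-- shared module helper label_count (both Source A and Source B define it identically)
def label_count (d : String) : Int :=
  if d = "" then 0 else (PySem.Str.count d "." : Int) + 1

def pvDedupStep (st : List String × PySem.Set String × List String × PySem.Set String)
    (kv : String × String) :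
    List String × PySem.Set String × List String × PySem.Set String :=
  if kv.1 = "keyword" then
    if kv.2 ∉ st.2.1 then (st.1 ++ [kv.2], st.2.1.add kv.2, st.2.2.1, st.2.2.2) else st
  else if kv.1 = "regexp" then
    if kv.2 ∉ st.2.2.2 then (st.1, st.2.1, st.2.2.1 ++ [kv.2], st.2.2.2.add kv.2) else st
  else st

def dedup_other_rules (other_rules : List (String × String)) :
    List String × List String :=
  -- state = (kw, seen_kw, rx, seen_rx); pvDedupStep is A's loop body
  let st := other_rules.foldl pvDedupStep ([], PySem.Set.empty, [], PySem.Set.empty)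
  (st.1, st.2.2.1)

-- A's rank dict and nested `key` helper; Lex (Int × Lex (Int × String)) is exactly
-- Python's lexicographic order on the tuple (rank, label_count, val)
def pvRank : PySem.Dict String Int :=
  PySem.Dict.mk [("full", 0), ("domain", 1), ("keyword", 2), ("regexp", 3)]

def pvKeyA (t : String × String) : Lex (Int × Lex (Int × String)) :=
  toLex (pvRank.getD t.2 99, toLex (label_count t.1, t.1))

def build_xray_preserve_output_from_sets (e : List String) (plus : List String) (other_rules : List (String × String)) : List String :=
  let kwrx := dedup_other_rules other_rules
  let kw_list := kwrx.1
  let rx_list := kwrx.2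
  let items : List (String × String) :=
    plus.map (fun b => (b, "domain")) ++ e.map (fun b => (b, "full"))
      ++ kw_list.map (fun v => (v, "keyword")) ++ rx_list.map (fun v => (v, "regexp"))
  let sortedItems := PySem.List.sorted items pvKeyA
  sortedItems.foldl (fun out t =>
    if t.2 = "full" then out ++ ["full:" ++ t.1]
    else if t.2 = "domain" then out ++ [t.1]
    else if t.2 = "keyword" then out ++ ["keyword:" ++ t.1]
    else if t.2 = "regexp" then out ++ ["regexp:" ++ t.1]
    else out) []

-- ===== PORT B =====
-- B's key v -> (label_count v, v); Lex (Int × String) is Python's tuple order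
def pvKeyB (v : String) : Lex (Int × String) :=
  toLex (label_count v, v)

def build_xray_preserve_output_from_sets_alt (e : List String) (plus : List String) (other_rules : List (String × String)) : List String :=
  let kw := PySem.List.dedup ((other_rules.filter (fun kv => kv.1 == "keyword")).map Prod.snd)
  let rx := PySem.List.dedup ((other_rules.filter (fun kv => kv.1 == "regexp")).map Prod.snd)
  (PySem.List.sorted e pvKeyB).map (fun v => "full:" ++ v)
    ++ PySem.List.sorted plus pvKeyB
    ++ (PySem.List.sorted kw pvKeyB).map (fun v => "keyword:" ++ v)
    ++ (PySem.List.sorted rx pvKeyB).map (fun v => "regexp:" ++ v)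

-- ===== PRECONDITION & SPEC =====
def Spec_build_xray_preserve_output_from_sets (e : List String) (plus : List String) (other_rules : List (String × String)) (out : List String) : Prop := out = build_xray_preserve_output_from_sets_alt e plus other_rules
instance (e : List String) (plus : List String) (other_rules : List (String × String)) (out : List String) : Decidable (Spec_build_xray_preserve_output_from_sets e plus other_rules out) := by unfold Spec_build_xray_preserve_output_from_sets; infer_instance

-- ===== CLAIM (what is proved, stated in full; the proofs are below) =====
def Claim_equal_build_xray_preserve_output_from_sets : Prop := ∀ (e : List String) (plus : List String) (other_rules : List (String × String)), Dom_build_xray_preserve_output_from_sets e plus other_rules → Spec_build_xray_preserve_output_from_sets e plus other_rules (build_xray_preserve_output_from_sets e plus other_rules)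

-- ===== LEMMAS AND PROOFS =====

-- insertBy facts (stable insertion; all about a generic Bool comparison)
theorem pv_insertBy_all_true {α : Type} (before : α → α → Bool) (x : α) (r : List α)
    (h : ∀ b ∈ r, before x b = true) :
    PySem.List.insertBy before x r = x :: r := by
  cases r with
  | nil => rfl
  | cons y ys => simp [PySem.List.insertBy, h y (by simp)]

theorem pv_insertBy_low {α : Type} (before : α → α → Bool) (x : α) (l r : List α)
    (h : ∀ b ∈ r, before x b = true) :
    PySem.List.insertBy before x (l ++ r) = PySem.List.insertBy before x l ++ r := by
  induction l with
  | nil => simp [pv_insertBy_all_true before x r h, PySem.List.insertBy]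
  | cons y l ih => by_cases hb : before x y <;> simp [PySem.List.insertBy, hb, ih]

theorem pv_insertBy_high {α : Type} (before : α → α → Bool) (x : α) (l r : List α)
    (h : ∀ a ∈ l, before x a = false) :
    PySem.List.insertBy before x (l ++ r) = l ++ PySem.List.insertBy before x r := by
  induction l with
  | nil => simp
  | cons y l ih =>
      simp [PySem.List.insertBy, h y (by simp)]
      exact ih (fun a ha => h a (by simp [ha]))

theorem pv_foldl_ins_low {α : Type} (before : α → α → Bool) (ys : List α) :
    ∀ (acc r : List α), (∀ y ∈ ys, ∀ b ∈ r, before y b = true) →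
    ys.foldl (fun acc x => PySem.List.insertBy before x acc) (acc ++ r)
      = ys.foldl (fun acc x => PySem.List.insertBy before x acc) acc ++ r := by
  induction ys with
  | nil => intro acc r _; simp
  | cons y ys ih =>
      intro acc r h
      simp only [List.foldl_cons]
      rw [pv_insertBy_low before y acc r (h y (by simp))]
      exact ih _ r (fun z hz b hb => h z (by simp [hz]) b hb)

theorem pv_foldl_ins_low' {α : Type} (before : α → α → Bool) (ys r : List α)
    (h : ∀ y ∈ ys, ∀ b ∈ r, before y b = true) :
    ys.foldl (fun acc x => PySem.List.insertBy before x acc) r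
      = ys.foldl (fun acc x => PySem.List.insertBy before x acc) [] ++ r := by
  have := pv_foldl_ins_low before ys [] r h
  simpa using this

theorem pv_foldl_ins_high {α : Type} (before : α → α → Bool) (ys : List α) :
    ∀ (l acc : List α), (∀ y ∈ ys, ∀ a ∈ l, before y a = false) →
    ys.foldl (fun acc x => PySem.List.insertBy before x acc) (l ++ acc)
      = l ++ ys.foldl (fun acc x => PySem.List.insertBy before x acc) acc := by
  induction ys with
  | nil => intro l acc _; simp
  | cons y ys ih =>
      intro l acc h
      simp only [List.foldl_cons]
      rw [pv_insertBy_high before y l acc (h y (by simp))]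
      exact ih l _ (fun z hz a ha => h z (by simp [hz]) a ha)

theorem pv_foldl_ins_high' {α : Type} (before : α → α → Bool) (ys l : List α)
    (h : ∀ y ∈ ys, ∀ a ∈ l, before y a = false) :
    ys.foldl (fun acc x => PySem.List.insertBy before x acc) l
      = l ++ ys.foldl (fun acc x => PySem.List.insertBy before x acc) [] := by
  have := pv_foldl_ins_high before ys l [] h
  simpa using this

-- a sort of a tagged copy is the tagged copy of the sort, when comparisons agree
theorem pv_insertBy_map {α β : Type} (f : α → β) (bfβ : β → β → Bool) (bfα : α → α → Bool)
    (hc : ∀ a b, bfβ (f a) (f b) = bfα a b) (x : α) (l : List α) :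
    PySem.List.insertBy bfβ (f x) (l.map f) = (PySem.List.insertBy bfα x l).map f := by
  induction l with
  | nil => rfl
  | cons y l ih => by_cases hb : bfα x y <;> simp [PySem.List.insertBy, hc, hb, ih]

theorem pv_foldl_ins_map {α β : Type} (f : α → β) (bfβ : β → β → Bool) (bfα : α → α → Bool)
    (hc : ∀ a b, bfβ (f a) (f b) = bfα a b) (m : List α) :
    ∀ acc : List α,
    (m.map f).foldl (fun acc x => PySem.List.insertBy bfβ x acc) (acc.map f)
      = (m.foldl (fun acc x => PySem.List.insertBy bfα x acc) acc).map f := by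
  induction m with
  | nil => intro acc; simp
  | cons y m ih =>
      intro acc
      simp only [List.map_cons, List.foldl_cons]
      rw [pv_insertBy_map f bfβ bfα hc y acc]
      exact ih _

-- Lex order facts (Python's tuple comparison)
theorem pv_lex_lt_left {r1 r2 : Int} {k1 k2 : Lex (Int × String)} (h : r1 < r2) :
    (toLex (r1, k1) : Lex (Int × Lex (Int × String))) < toLex (r2, k2) :=
  Prod.Lex.toLex_lt_toLex.mpr (Or.inl h)

theorem pv_lex_decide_false {r1 r2 : Int} {k1 k2 : Lex (Int × String)} (h : r1 < r2) :
    decide ((toLex (r2, k2) : Lex (Int × Lex (Int × String))) < toLex (r1, k1)) = false := by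
  apply decide_eq_false
  intro hlt
  rcases Prod.Lex.toLex_lt_toLex.mp hlt with h' | ⟨h', _⟩ <;> omega

theorem pv_lex_lt_snd {r : Int} {k1 k2 : Lex (Int × String)} :
    ((toLex (r, k1) : Lex (Int × Lex (Int × String))) < toLex (r, k2)) ↔ k1 < k2 := by
  rw [Prod.Lex.toLex_lt_toLex]; simp

theorem pv_keyA_eq (v t : String) :
    pvKeyA (v, t) = toLex (pvRank.getD t 99, pvKeyB v) := rfl

-- a sorted tagged group is the tagged sorted group
theorem pv_sorted_tagged (m : List String) (t : String) :
    PySem.List.sorted (m.map (fun v => (v, t))) pvKeyA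
      = (PySem.List.sorted m pvKeyB).map (fun v => (v, t)) := by
  rw [PySem.List.sorted_eq_foldl_insertBy, PySem.List.sorted_eq_foldl_insertBy]
  have := pv_foldl_ins_map (fun v => (v, t))
    (fun a b => decide (pvKeyA a < pvKeyA b)) (fun a b => decide (pvKeyB a < pvKeyB b))
    (fun a b => by
      simp only [pv_keyA_eq]
      rw [decide_eq_decide]
      exact pv_lex_lt_snd) m []
  simpa using this

-- the dedup loop of A computes dict.fromkeys of each filtered value list
theorem pv_dedup_fold (rules : List (String × String)) :
    ∀ (kw rx : List String),
    rules.foldl pvDedupStep (kw, kw, rx, rx)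
      = ((((rules.filter (fun kv => kv.1 == "keyword")).map Prod.snd).foldl PySem.Set.add kw
          : List String),
         (((rules.filter (fun kv => kv.1 == "keyword")).map Prod.snd).foldl PySem.Set.add kw),
         (((rules.filter (fun kv => kv.1 == "regexp")).map Prod.snd).foldl PySem.Set.add rx),
         (((rules.filter (fun kv => kv.1 == "regexp")).map Prod.snd).foldl PySem.Set.add rx)) := by
  induction rules with
  | nil => intro kw rx; rfl
  | cons kv rules ih =>
      intro kw rx
      obtain ⟨k, v⟩ := kv
      rw [List.foldl_cons]
      by_cases hk : k = "keyword"
      · subst hk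
        by_cases hv : v ∈ kw
        · have hstep : pvDedupStep ((kw : List String), (kw : PySem.Set String),
              (rx : List String), (rx : PySem.Set String)) ("keyword", v) = (kw, kw, rx, rx) := by
            simp [pvDedupStep, hv]
          have hadd : PySem.Set.add kw v = kw := by
            simp [PySem.Set.add, hv]
          rw [hstep, ih kw rx]
          simp [hadd]
        · have hadd : PySem.Set.add kw v = kw ++ [v] := by
            simp [PySem.Set.add, hv]
          have hstep : pvDedupStep ((kw : List String), (kw : PySem.Set String),
              (rx : List String), (rx : PySem.Set String)) ("keyword", v)
              = (kw ++ [v], kw ++ [v], rx, rx) := by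
            simp [pvDedupStep, hv]
          rw [hstep, ih (kw ++ [v]) rx]
          simp [hadd]
      · by_cases hr : k = "regexp"
        · subst hr
          by_cases hv : v ∈ rx
          · have hstep : pvDedupStep ((kw : List String), (kw : PySem.Set String),
                (rx : List String), (rx : PySem.Set String)) ("regexp", v) = (kw, kw, rx, rx) := by
              simp [pvDedupStep, hv]
            have hadd : PySem.Set.add rx v = rx := by
              simp [PySem.Set.add, hv]
            rw [hstep, ih kw rx]
            simp [hadd]
          · have hadd : PySem.Set.add rx v = rx ++ [v] := by
              simp [PySem.Set.add, hv]
            have hstep : pvDedupStep ((kw : List String), (kw : PySem.Set String),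
                (rx : List String), (rx : PySem.Set String)) ("regexp", v)
                = (kw, kw, rx ++ [v], rx ++ [v]) := by
              simp [pvDedupStep, hv]
            rw [hstep, ih kw (rx ++ [v])]
            simp [hadd]
        · have hstep : pvDedupStep ((kw : List String), (kw : PySem.Set String),
              (rx : List String), (rx : PySem.Set String)) (k, v) = (kw, kw, rx, rx) := by
            simp [pvDedupStep, hk, hr]
          rw [hstep, ih kw rx]
          simp [show (k == "keyword") = false by simpa using hk,
            show (k == "regexp") = false by simpa using hr]

-- rank values (lookups in A's literal dict)
theorem pv_rank_full : pvRank.getD "full" 99 = 0 := rfl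
theorem pv_rank_domain : pvRank.getD "domain" 99 = 1 := rfl
theorem pv_rank_keyword : pvRank.getD "keyword" 99 = 2 := rfl
theorem pv_rank_regexp : pvRank.getD "regexp" 99 = 3 := rfl

-- proof-only helpers: A's output-dispatch loop body under a name, and its per-tag shape
def pvDispatch (out : List String) (t : String × String) : List String :=
  if t.2 = "full" then out ++ ["full:" ++ t.1]
  else if t.2 = "domain" then out ++ [t.1]
  else if t.2 = "keyword" then out ++ ["keyword:" ++ t.1]
  else if t.2 = "regexp" then out ++ ["regexp:" ++ t.1]
  else out

theorem pv_fold_dispatch_map (t : String) (g : String → String)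
    (hg : ∀ (out : List String) (v : String), pvDispatch out (v, t) = out ++ [g v])
    (m acc : List String) :
    (m.map (fun v => (v, t))).foldl pvDispatch acc = acc ++ m.map g := by
  rw [List.foldl_map]
  simp only [hg]
  exact PySem.List.foldl_append_singleton_eq_map g m acc

-- the composite-key stable sort of the merged tagged list splits into the four group sorts
theorem pv_sorted_groups (e plus K R : List String) :
    PySem.List.sorted (plus.map (fun b => (b, "domain")) ++ e.map (fun b => (b, "full"))
        ++ K.map (fun v => (v, "keyword")) ++ R.map (fun v => (v, "regexp"))) pvKeyA
    = (PySem.List.sorted e pvKeyB).map (fun v => (v, "full"))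
      ++ (PySem.List.sorted plus pvKeyB).map (fun v => (v, "domain"))
      ++ (PySem.List.sorted K pvKeyB).map (fun v => (v, "keyword"))
      ++ (PySem.List.sorted R pvKeyB).map (fun v => (v, "regexp")) := by
  have hgrp : ∀ (m : List String) (t : String),
      (m.map (fun v => (v, t))).foldl
          (fun acc x => PySem.List.insertBy (fun a b => decide (pvKeyA a < pvKeyA b)) x acc) []
        = (PySem.List.sorted m pvKeyB).map (fun v => (v, t)) := by
    intro m t
    rw [← PySem.List.sorted_eq_foldl_insertBy, pv_sorted_tagged]
  rw [PySem.List.sorted_eq_foldl_insertBy]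
  rw [List.foldl_append, List.foldl_append, List.foldl_append]
  rw [hgrp plus "domain"]
  rw [pv_foldl_ins_low' (fun a b => decide (pvKeyA a < pvKeyA b))
      (e.map (fun b => (b, "full"))) ((PySem.List.sorted plus pvKeyB).map (fun v => (v, "domain")))
      (by
        rintro y hy b hb
        obtain ⟨vy, -, rfl⟩ := List.mem_map.mp hy
        obtain ⟨vb, -, rfl⟩ := List.mem_map.mp hb
        simp only [pv_keyA_eq, pv_rank_full, pv_rank_domain]
        exact decide_eq_true (pv_lex_lt_left (by norm_num)))]
  rw [hgrp e "full"]
  rw [pv_foldl_ins_high' (fun a b => decide (pvKeyA a < pvKeyA b))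
      (K.map (fun v => (v, "keyword")))
      ((PySem.List.sorted e pvKeyB).map (fun v => (v, "full"))
        ++ (PySem.List.sorted plus pvKeyB).map (fun v => (v, "domain")))
      (by
        rintro y hy a ha
        obtain ⟨vy, -, rfl⟩ := List.mem_map.mp hy
        rcases List.mem_append.mp ha with h | h
        · obtain ⟨va, -, rfl⟩ := List.mem_map.mp h
          simp only [pv_keyA_eq, pv_rank_full, pv_rank_keyword]
          exact pv_lex_decide_false (by norm_num)
        · obtain ⟨va, -, rfl⟩ := List.mem_map.mp h
          simp only [pv_keyA_eq, pv_rank_domain, pv_rank_keyword]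
          exact pv_lex_decide_false (by norm_num))]
  rw [hgrp K "keyword"]
  rw [pv_foldl_ins_high' (fun a b => decide (pvKeyA a < pvKeyA b))
      (R.map (fun v => (v, "regexp")))
      (((PySem.List.sorted e pvKeyB).map (fun v => (v, "full"))
          ++ (PySem.List.sorted plus pvKeyB).map (fun v => (v, "domain")))
        ++ (PySem.List.sorted K pvKeyB).map (fun v => (v, "keyword")))
      (by
        rintro y hy a ha
        obtain ⟨vy, -, rfl⟩ := List.mem_map.mp hy
        rcases List.mem_append.mp ha with h | h
        · rcases List.mem_append.mp h with h' | h'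
          · obtain ⟨va, -, rfl⟩ := List.mem_map.mp h'
            simp only [pv_keyA_eq, pv_rank_full, pv_rank_regexp]
            exact pv_lex_decide_false (by norm_num)
          · obtain ⟨va, -, rfl⟩ := List.mem_map.mp h'
            simp only [pv_keyA_eq, pv_rank_domain, pv_rank_regexp]
            exact pv_lex_decide_false (by norm_num)
        · obtain ⟨va, -, rfl⟩ := List.mem_map.mp h
          simp only [pv_keyA_eq, pv_rank_keyword, pv_rank_regexp]
          exact pv_lex_decide_false (by norm_num))]
  rw [hgrp R "regexp"]

-- A's dedup loop equals dict.fromkeys of each filtered value list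
theorem pv_dedup_eq (other_rules : List (String × String)) :
    dedup_other_rules other_rules
      = (PySem.List.dedup ((other_rules.filter (fun kv => kv.1 == "keyword")).map Prod.snd),
         PySem.List.dedup ((other_rules.filter (fun kv => kv.1 == "regexp")).map Prod.snd)) := by
  unfold dedup_other_rules
  have h := pv_dedup_fold other_rules [] []
  simp only [PySem.List.dedup_eq_ofList, PySem.Set.ofList, PySem.Set.empty]
  simp [h]

-- ===== VERDICT (by name: the statement is the Claim_ definition above) =====
theorem build_xray_preserve_output_from_sets_spec : Claim_equal_build_xray_preserve_output_from_sets := by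
  intro e plus other_rules _
  unfold Spec_build_xray_preserve_output_from_sets
  simp only [build_xray_preserve_output_from_sets, build_xray_preserve_output_from_sets_alt]
  rw [pv_dedup_eq other_rules]
  rw [pv_sorted_groups]
  rw [show (fun (out : List String) (t : String × String) =>
      if t.2 = "full" then out ++ ["full:" ++ t.1]
      else if t.2 = "domain" then out ++ [t.1]
      else if t.2 = "keyword" then out ++ ["keyword:" ++ t.1]
      else if t.2 = "regexp" then out ++ ["regexp:" ++ t.1]
      else out) = pvDispatch from rfl]
  rw [List.foldl_append, List.foldl_append, List.foldl_append]
  rw [pv_fold_dispatch_map "full" (fun v => "full:" ++ v) (by intro out v; simp [pvDispatch])]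
  rw [pv_fold_dispatch_map "domain" (fun v => v) (by intro out v; simp [pvDispatch])]
  rw [pv_fold_dispatch_map "keyword" (fun v => "keyword:" ++ v) (by intro out v; simp [pvDispatch])]
  rw [pv_fold_dispatch_map "regexp" (fun v => "regexp:" ++ v) (by intro out v; simp [pvDispatch])]
  simp [List.append_assoc]
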